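-- pv_equiv track=rewrite | github.com/PatrickAllenCooper/blanc | src/blanc/ontology/sumo_extractor.py | _tokenize_kif
-- ===== SOURCE A (Python) =====
-- from typing import Dict, List, Optional, Set, Tuple
--
-- def _tokenize_kif(text: str) -> List[str]:
--     """Tokenize a KIF string into parentheses, quoted strings, and atoms."""
--     tokens: List[str] = []
--     i = 0
--     n = len(text)
--     while i < n:
--         ch = text[i]
--         if ch in " \t\r\n":
--             i += 1
--         elif ch == ";":
--             while i < n and text[i] != "\n":
--                 i += 1
--         elif ch in "()" :
--             tokens.append(ch)
--             i += 1
--         elif ch == '"':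
--             j = i + 1
--             while j < n and text[j] != '"':
--                 if text[j] == "\\":
--                     j += 1
--                 j += 1
--             tokens.append(text[i : j + 1])
--             i = j + 1
--         else:
--             j = i
--             while j < n and text[j] not in " \t\r\n();\"":
--                 j += 1
--             tokens.append(text[i:j])
--             i = j
--     return tokens
-- ===== SOURCE B (Python) =====
-- from typing import List
--
-- def _tokenize_kif(text: str) -> List[str]:
--     """Single-pass state-machine tokenizer: one for-loop over the characters
--     with an explicit mode (normal / comment / string / string-escape) and a
--     character buffer, instead of nested index scans with slicing."""
--     tokens: List[str] = []
--     mode = 0  # 0 normal, 1 comment, 2 inside string, 3 string escape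
--     buf: List[str] = []
--     for ch in text:
--         if mode == 1:
--             if ch == "\n":
--                 mode = 0
--         elif mode == 2:
--             buf.append(ch)
--             if ch == '"':
--                 tokens.append("".join(buf))
--                 buf = []
--                 mode = 0
--             elif ch == "\\":
--                 mode = 3
--         elif mode == 3:
--             buf.append(ch)
--             mode = 2
--         else:
--             if ch in ' \t\r\n();"':
--                 if buf:
--                     tokens.append("".join(buf))
--                     buf = []
--                 if ch in "()":
--                     tokens.append(ch)
--                 elif ch == ";":
--                     mode = 1
--                 elif ch == '"':
--                     buf = ['"']
--                     mode = 2
--             else: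
--                 buf.append(ch)
--     if buf:
--         tokens.append("".join(buf))
--     return tokens
-- ===== Notes on version B (the rewrite author's own statement) =====
-- stated objective: alternative
-- what changed: Replaced A's nested index-scanning loops (outer while with inner whiles re-slicing the text) by a single for-loop finite state machine (normal/comment/string/escape modes) that builds each token in a character buffer in one left-to-right pass.
import Mathlib
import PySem

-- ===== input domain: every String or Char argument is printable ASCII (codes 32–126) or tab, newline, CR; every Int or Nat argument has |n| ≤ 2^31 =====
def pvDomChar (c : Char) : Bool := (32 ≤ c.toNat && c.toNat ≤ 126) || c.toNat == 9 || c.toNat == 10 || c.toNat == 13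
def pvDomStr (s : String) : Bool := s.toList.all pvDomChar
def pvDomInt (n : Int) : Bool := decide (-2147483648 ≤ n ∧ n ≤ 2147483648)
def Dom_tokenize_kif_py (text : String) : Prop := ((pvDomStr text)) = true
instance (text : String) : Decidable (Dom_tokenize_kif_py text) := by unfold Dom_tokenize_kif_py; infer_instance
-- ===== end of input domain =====

-- B is an alternative single-pass state-machine tokenizer; same O(n) cost, different structure.

-- ===== PORT A =====
-- the delimiter set " \t\r\n();\"" of A's atom scan
def pvDelims : List Char := [' ', '\t', '\r', '\n', '(', ')', ';', '"']

-- inner while of the ';' branch: while i < n and text[i] != '\n': i += 1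
def pvCommentSkip (cs : List Char) (i : Nat) : Nat :=
  if h : i < cs.length then
    if cs[i] = '\n' then i else pvCommentSkip cs (i + 1)
  else i
termination_by cs.length - i

-- inner while of the '"' branch (escape skips one extra char)
def pvStringScan (cs : List Char) (j : Nat) : Nat :=
  if h : j < cs.length then
    if cs[j] = '"' then j
    else if cs[j] = '\\' then pvStringScan cs (j + 2)
    else pvStringScan cs (j + 1)
  else j
termination_by cs.length - j

-- inner while of the atom branch
def pvAtomScan (cs : List Char) (j : Nat) : Nat :=
  if h : j < cs.length then
    if cs[j] ∈ pvDelims then j else pvAtomScan cs (j + 1)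
  else j
termination_by cs.length - j

-- outer while of A (fuel = remaining iterations bound, a totality guard only);
-- tokens accumulated in acc; slices are exact (nonnegative bounds clamp like take/drop)
def pvTokALoop (cs : List Char) (fuel : Nat) (i : Nat) (acc : List String) : List String :=
  match fuel with
  | 0 => acc
  | fuel + 1 =>
    if h : i < cs.length then
      if hw : cs[i] ∈ [' ', '\t', '\r', '\n'] then
        pvTokALoop cs fuel (i + 1) acc
      else if hc : cs[i] = ';' then
        pvTokALoop cs fuel (pvCommentSkip cs i) acc
      else if hp : cs[i] = '(' ∨ cs[i] = ')' then
        pvTokALoop cs fuel (i + 1) (acc ++ [String.ofList [cs[i]]])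
      else if hq : cs[i] = '\"' then
        let j := pvStringScan cs (i + 1)
        pvTokALoop cs fuel (j + 1) (acc ++ [String.ofList (PySem.List.slice cs (some (i : Int)) (some ((j + 1 : Nat) : Int)))])
      else
        let j := pvAtomScan cs i
        pvTokALoop cs fuel j (acc ++ [String.ofList (PySem.List.slice cs (some (i : Int)) (some ((j : Nat) : Int)))])
    else acc

def tokenize_kif_py (text : String) : List String :=
  pvTokALoop text.toList (text.toList.length + 1) 0 []

-- ===== PORT B =====
inductive PVMode where
  | norm | cmt | instr | esc
  deriving DecidableEq, Repr

-- one step of B's state machine: (tokens, mode, buffer) consuming one character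
def pvStepB (st : List String × PVMode × List Char) (c : Char) : List String × PVMode × List Char :=
  let (toks, m, buf) := st
  match m with
  | .cmt => if c = '\n' then (toks, .norm, buf) else (toks, .cmt, buf)
  | .instr =>
      let buf' := buf ++ [c]
      if c = '"' then (toks ++ [String.ofList buf'], .norm, [])
      else if c = '\\' then (toks, .esc, buf')
      else (toks, .instr, buf')
  | .esc => (toks, .instr, buf ++ [c])
  | .norm =>
      if c ∈ pvDelims then
        let toks' := if buf ≠ [] then toks ++ [String.ofList buf] else toks
        if c = '(' ∨ c = ')' then (toks' ++ [String.ofList [c]], .norm, [])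
        else if c = ';' then (toks', .cmt, [])
        else if c = '"' then (toks', .instr, ['"'])
        else (toks', .norm, [])
      else (toks, .norm, buf ++ [c])

-- final flush of a non-empty buffer
def pvFinishB (st : List String × PVMode × List Char) : List String :=
  if st.2.2 ≠ [] then st.1 ++ [String.ofList st.2.2] else st.1

def tokenize_kif_py_alt (text : String) : List String :=
  pvFinishB (text.toList.foldl pvStepB ([], .norm, []))

-- ===== PRECONDITION & SPEC =====
def Spec_tokenize_kif_py (text : String) (out : List String) : Prop := out = tokenize_kif_py_alt text
instance (text : String) (out : List String) : Decidable (Spec_tokenize_kif_py text out) := by unfold Spec_tokenize_kif_py; infer_instance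

-- ===== CLAIM (what is proved, stated in full; the proofs are below) =====
def Claim_equal_tokenize_kif_py : Prop := ∀ (text : String), Dom_tokenize_kif_py text → Spec_tokenize_kif_py text (tokenize_kif_py text)

-- ===== LEMMAS AND PROOFS =====

theorem pvCommentSkip_ge (cs : List Char) (i : Nat) : i ≤ pvCommentSkip cs i := by
  fun_induction pvCommentSkip cs i
  all_goals omega

theorem pvStringScan_ge (cs : List Char) (j : Nat) : j ≤ pvStringScan cs j := by
  fun_induction pvStringScan cs j
  all_goals omega

theorem pvAtomScan_ge (cs : List Char) (j : Nat) : j ≤ pvAtomScan cs j := by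
  fun_induction pvAtomScan cs j
  all_goals omega

theorem commentSkip_eq_next (cs : List Char) (i : Nat) (h : i < cs.length)
    (hne : cs[i] ≠ '\n') : pvCommentSkip cs i = pvCommentSkip cs (i + 1) := by
  rw [pvCommentSkip]; simp [h, hne]

theorem atomScan_eq_next (cs : List Char) (i : Nat) (h : i < cs.length)
    (hne : cs[i] ∉ pvDelims) : pvAtomScan cs i = pvAtomScan cs (i + 1) := by
  rw [pvAtomScan]; simp [h, hne]

theorem commentSkip_stop (cs : List Char) (j : Nat) :
    ∀ (h : pvCommentSkip cs j < cs.length), cs[pvCommentSkip cs j] = '\n' := by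
  fun_induction pvCommentSkip cs j with
  | case1 j h hnl => intro _; exact hnl
  | case2 j h hnl ih => exact ih
  | case3 j h => intro hlt; omega

-- in comment mode, characters before the stopping point are no-ops
theorem cmt_skip (cs : List Char) (j : Nat) (acc : List String) :
    (cs.drop (pvCommentSkip cs j)).foldl pvStepB (acc, PVMode.cmt, []) =
      (cs.drop j).foldl pvStepB (acc, PVMode.cmt, []) := by
  fun_induction pvCommentSkip cs j with
  | case1 j h hnl => rfl
  | case2 j h hnl ih =>
      rw [ih, List.drop_eq_getElem_cons h, List.foldl_cons]
      simp [pvStepB, hnl]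
  | case3 j h => rfl

-- string mode: the fold consumes exactly what A's string scan consumes and flushes the same token
theorem str_fold (cs : List Char) (j : Nat) :
    ∀ (toks : List String) (b : List Char), b ≠ [] →
      pvFinishB ((cs.drop j).foldl pvStepB (toks, PVMode.instr, b)) =
        pvFinishB ((cs.drop (pvStringScan cs j + 1)).foldl pvStepB
          (toks ++ [String.ofList (b ++ (cs.drop j).take (pvStringScan cs j + 1 - j))],
            PVMode.norm, [])) := by
  fun_induction pvStringScan cs j with
  | case1 j h hq =>
      intro toks b hb
      rw [List.drop_eq_getElem_cons h, List.foldl_cons]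
      simp [pvStepB, hq, List.take_succ_cons]
  | case2 j h hq hbs ih =>
      intro toks b hb
      rw [List.drop_eq_getElem_cons h, List.foldl_cons]
      have hstep : pvStepB (toks, PVMode.instr, b) cs[j] = (toks, PVMode.esc, b ++ [cs[j]]) := by
        simp [pvStepB, hbs]
      rw [hstep]
      by_cases h2 : j + 1 < cs.length
      · rw [List.drop_eq_getElem_cons h2, List.foldl_cons]
        have hstep2 : pvStepB (toks, PVMode.esc, b ++ [cs[j]]) cs[j+1]
            = (toks, PVMode.instr, b ++ [cs[j]] ++ [cs[j+1]]) := by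
          simp [pvStepB]
        rw [hstep2, ih toks (b ++ [cs[j]] ++ [cs[j+1]]) (by simp)]
        have hge : j + 2 ≤ pvStringScan cs (j + 2) := pvStringScan_ge cs (j + 2)
        have harith : pvStringScan cs (j + 2) + 1 - j = (pvStringScan cs (j + 2) + 1 - (j + 2)) + 2 := by omega
        rw [harith, hbs, List.take_succ_cons]
        have harith2 : pvStringScan cs (j + 2) + 1 - (j + 2) = pvStringScan cs (j + 2) - (j + 1) := by
          omega
        have hexp : List.take (pvStringScan cs (j + 2) - (j + 1) + 1) (List.drop (j + 1) cs)
            = cs[j + 1] :: List.take (pvStringScan cs (j + 2) - (j + 1)) (List.drop (j + 2) cs) := by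
          rw [List.drop_eq_getElem_cons h2, List.take_succ_cons]
        simp [harith2, hexp]
      · have hd1 : cs.drop (j + 1) = [] := List.drop_eq_nil_of_le (by omega)
        have hscan : pvStringScan cs (j + 2) = j + 2 := by
          rw [pvStringScan]
          simp [show ¬ (j + 2 < cs.length) by omega]
        have hd2 : cs.drop (pvStringScan cs (j + 2) + 1) = [] := by
          rw [hscan]; exact List.drop_eq_nil_of_le (by omega)
        rw [hd1, hd2, hscan, hbs]
        have h3 : j + 2 + 1 - j = 3 := by omega
        simp [pvFinishB, hb, h3]
  | case3 j h hq hbs ih =>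
      intro toks b hb
      rw [List.drop_eq_getElem_cons h, List.foldl_cons]
      have hstep : pvStepB (toks, PVMode.instr, b) cs[j] = (toks, PVMode.instr, b ++ [cs[j]]) := by
        simp [pvStepB, hq, hbs]
      rw [hstep, ih toks (b ++ [cs[j]]) (by simp)]
      have hge : j + 1 ≤ pvStringScan cs (j + 1) := pvStringScan_ge cs (j + 1)
      have harith : pvStringScan cs (j + 1) + 1 - j = (pvStringScan cs (j + 1) + 1 - (j + 1)) + 1 := by omega
      rw [harith, List.take_succ_cons]
      simp
  | case4 j h =>
      intro toks b hb
      have hd : cs.drop j = [] := List.drop_eq_nil_of_le (by omega)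
      have hd2 : cs.drop (j + 1) = [] := List.drop_eq_nil_of_le (by omega)
      rw [hd, hd2]
      simp [pvFinishB, hb]

-- atom building in normal mode: the fold flushes exactly A's atom slice at the first delimiter
theorem atom_fold (cs : List Char) (j : Nat) :
    ∀ (toks : List String) (b : List Char), b ≠ [] →
      pvFinishB ((cs.drop j).foldl pvStepB (toks, PVMode.norm, b)) =
        pvFinishB ((cs.drop (pvAtomScan cs j)).foldl pvStepB
          (toks ++ [String.ofList (b ++ (cs.drop j).take (pvAtomScan cs j - j))],
            PVMode.norm, [])) := by
  fun_induction pvAtomScan cs j with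
  | case1 j h hd =>
      intro toks b hb
      simp only [Nat.sub_self, List.take_zero, List.append_nil]
      rw [List.drop_eq_getElem_cons h, List.foldl_cons, List.foldl_cons]
      have hstep : pvStepB (toks, PVMode.norm, b) cs[j]
          = pvStepB (toks ++ [String.ofList b], PVMode.norm, []) cs[j] := by
        simp [pvStepB, hd, hb]
      rw [hstep]
  | case2 j h hd ih =>
      intro toks b hb
      rw [List.drop_eq_getElem_cons h, List.foldl_cons]
      have hstep : pvStepB (toks, PVMode.norm, b) cs[j] = (toks, PVMode.norm, b ++ [cs[j]]) := by
        simp [pvStepB, hd]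
      rw [hstep, ih toks (b ++ [cs[j]]) (by simp)]
      have hge : j + 1 ≤ pvAtomScan cs (j + 1) := pvAtomScan_ge cs (j + 1)
      have harith : pvAtomScan cs (j + 1) - j = (pvAtomScan cs (j + 1) - (j + 1)) + 1 := by omega
      rw [harith, List.take_succ_cons]
      simp
  | case3 j h =>
      intro toks b hb
      have hd1 : cs.drop j = [] := List.drop_eq_nil_of_le (by omega)
      rw [hd1]
      simp [pvFinishB, hb]

theorem main_inv (cs : List Char) (fuel : Nat) :
    ∀ (i : Nat) (acc : List String), cs.length < fuel + i →
      pvTokALoop cs fuel i acc = pvFinishB ((cs.drop i).foldl pvStepB (acc, .norm, [])) := by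
  induction fuel with
  | zero =>
      intro i acc hf
      rw [pvTokALoop, List.drop_eq_nil_of_le (by omega)]
      simp [pvFinishB]
  | succ fuel ih =>
      intro i acc hf
      rw [pvTokALoop]
      by_cases h : i < cs.length
      · simp only [dif_pos h]
        by_cases hw : cs[i] ∈ [' ', '\t', '\r', '\n']
        · simp only [dif_pos hw]
          rw [ih (i + 1) acc (by omega), List.drop_eq_getElem_cons h, List.foldl_cons]
          simp only [List.mem_cons, List.not_mem_nil, or_false] at hw
          rcases hw with h1 | h1 | h1 | h1 <;> rw [h1] <;> simp [pvStepB, pvDelims]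
        · simp only [dif_neg hw]
          by_cases hc : cs[i] = ';'
          · simp only [dif_pos hc]
            have hk1 : i + 1 ≤ pvCommentSkip cs i := by
              rw [commentSkip_eq_next cs i h (by rw [hc]; decide)]
              exact pvCommentSkip_ge cs (i + 1)
            rw [ih (pvCommentSkip cs i) acc (by omega),
              List.drop_eq_getElem_cons h, List.foldl_cons]
            have hstep : pvStepB (acc, PVMode.norm, []) cs[i] = (acc, PVMode.cmt, []) := by
              rw [hc]; simp [pvStepB, pvDelims]
            rw [hstep, ← cmt_skip cs (i + 1) acc]
            have hk : pvCommentSkip cs i = pvCommentSkip cs (i + 1) :=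
              commentSkip_eq_next cs i h (by rw [hc]; decide)
            rw [← hk]
            by_cases hlt : pvCommentSkip cs i < cs.length
            · have hnl := commentSkip_stop cs i hlt
              rw [List.drop_eq_getElem_cons hlt, List.foldl_cons, List.foldl_cons, hnl]
              simp [pvStepB, pvDelims]
            · have hd : cs.drop (pvCommentSkip cs i) = [] := List.drop_eq_nil_of_le (by omega)
              rw [hd]
              simp [pvFinishB]
          · simp only [dif_neg hc]
            by_cases hp : cs[i] = '(' ∨ cs[i] = ')'
            · simp only [dif_pos hp]
              rw [ih (i + 1) _ (by omega), List.drop_eq_getElem_cons h, List.foldl_cons]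
              have hstep : pvStepB (acc, PVMode.norm, []) cs[i]
                  = (acc ++ [String.ofList [cs[i]]], PVMode.norm, []) := by
                rcases hp with h1 | h1 <;> rw [h1] <;> simp [pvStepB, pvDelims]
              rw [hstep]
            · simp only [dif_neg hp]
              by_cases hq : cs[i] = '\"'
              · simp only [dif_pos hq]
                have hge := pvStringScan_ge cs (i + 1)
                rw [ih (pvStringScan cs (i + 1) + 1) _ (by omega), PySem.List.slice_natCast,
                  List.drop_eq_getElem_cons h, List.foldl_cons]
                have hstep : pvStepB (acc, PVMode.norm, []) cs[i] = (acc, PVMode.instr, ['\"']) := by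
                  rw [hq]; simp [pvStepB, pvDelims]
                rw [hstep, str_fold cs (i + 1) acc ['\"'] (by simp)]
                have harith : pvStringScan cs (i + 1) + 1 - i
                    = (pvStringScan cs (i + 1) + 1 - (i + 1)) + 1 := by omega
                rw [harith, List.take_succ_cons, hq]
                simp
              · simp only [dif_neg hq]
                have hnd : cs[i] ∉ pvDelims := by
                  intro hh
                  simp [pvDelims] at hh
                  simp at hw
                  tauto
                have hk : pvAtomScan cs i = pvAtomScan cs (i + 1) := atomScan_eq_next cs i h hnd
                have hge := pvAtomScan_ge cs (i + 1)
                rw [ih (pvAtomScan cs i) _ (by omega), PySem.List.slice_natCast,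
                  List.drop_eq_getElem_cons h, List.foldl_cons]
                have hstep : pvStepB (acc, PVMode.norm, []) cs[i] = (acc, PVMode.norm, [cs[i]]) := by
                  simp [pvStepB, hnd]
                rw [hstep, atom_fold cs (i + 1) acc [cs[i]] (by simp)]
                have harith : pvAtomScan cs (i + 1) - i = (pvAtomScan cs (i + 1) - (i + 1)) + 1 := by
                  omega
                rw [hk, harith, List.take_succ_cons]
                simp
      · simp only [dif_neg h]
        rw [List.drop_eq_nil_of_le (by omega)]
        simp [pvFinishB]

-- ===== VERDICT (by name: the statement is the Claim_ definition above) =====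
theorem tokenize_kif_py_spec : Claim_equal_tokenize_kif_py := by
  intro text _
  unfold Spec_tokenize_kif_py tokenize_kif_py tokenize_kif_py_alt
  simpa using main_inv text.toList (text.toList.length + 1) 0 [] (by omega)
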